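-- pv_equiv track=rewrite | github.com/dyi919/algorithm-practice | practice/2023_02/230201_Programmers_Move110/230201_Programmers_Move110.py | solution
-- ===== SOURCE A (Python) =====
-- def solution(strings):
--     answer = []
--
--     for s in strings:
--         stack = []
--         count = 0
--
--         for c in s:
--             if c == '0' and len(stack) >= 2 and stack[-1] == stack[-2] == '1':
--                 stack.pop()
--                 stack.pop()
--                 count += 1
--
--             else:
--                 stack.append(c)
--
--         pos = -1
--
--         for i in range(len(stack) - 1, -1, -1):
--             if stack[i] == '0':
--                 pos = i
--                 break
--
--         answer.append(''.join(stack[:pos + 1]) + '110' * count + ''.join(stack[pos + 1:]))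
--
--     return answer
-- ===== SOURCE B (Python) =====
-- def solution(strings):
--     answer = []
--     for s in strings:
--         t, count = s, 0
--         while True:
--             i = t.find('110')
--             if i < 0:
--                 break
--             t = t[:i] + t[i + 3:]
--             count += 1
--         pos = t.rfind('0')
--         answer.append(t[:pos + 1] + '110' * count + t[pos + 1:])
--     return answer
-- ===== Notes on version B (the rewrite author's own statement) =====
-- stated objective: simpler
-- what changed: Replaces A's char-by-char stack simulation and manual backwards index scan with a repeated remove-leftmost-'110' loop (str.find + slicing) plus str.rfind for the insertion point.
import Mathlib
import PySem

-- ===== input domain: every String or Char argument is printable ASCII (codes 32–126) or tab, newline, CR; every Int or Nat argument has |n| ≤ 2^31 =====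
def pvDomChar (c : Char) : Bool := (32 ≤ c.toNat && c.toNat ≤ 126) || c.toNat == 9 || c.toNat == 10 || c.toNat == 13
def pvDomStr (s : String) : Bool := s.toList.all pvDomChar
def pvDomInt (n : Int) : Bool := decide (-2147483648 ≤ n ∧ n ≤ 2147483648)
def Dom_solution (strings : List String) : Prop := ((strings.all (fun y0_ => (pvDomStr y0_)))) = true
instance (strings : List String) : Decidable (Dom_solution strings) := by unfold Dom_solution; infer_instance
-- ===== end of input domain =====

-- B replaces A's char-by-char stack with a repeated remove-leftmost-'110' loop (simpler, shorter); return values proved equal.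

-- ===== PORT A =====
-- stack is kept top-first (push = cons), so stack[-1]/stack[-2] are the first two elements.
def runA : List Char → List Char → Nat → List Char × Nat
  | [], st, c => (st, c)
  | x :: rest, st, c =>
    match st with
    | a :: b :: st' =>
      if x = '0' ∧ a = '1' ∧ b = '1' then runA rest st' (c + 1)
      else runA rest (x :: st) c
    | _ => runA rest (x :: st) c

-- for i in range(len(stack)-1, -1, -1): if stack[i]=='0': pos = i; break   (fuel = i+1)
def posLoopA (st : List Char) : Nat → Int
  | 0 => -1
  | i + 1 => if st.getD i ' ' = '0' then (i : Int) else posLoopA st i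

def solution (strings : List String) : List String :=
  strings.map (fun s =>
    let r := runA s.toList [] 0
    let stack := r.1.reverse
    let count := r.2
    let pos := posLoopA stack stack.length
    String.ofList (stack.take (pos + 1).toNat ++ (List.replicate count ['1', '1', '0']).flatten
               ++ stack.drop (pos + 1).toNat))

-- ===== PORT B =====
-- t.find('110'): exact hand port of leftmost-occurrence search, returning the split (before, after).
def find110 : List Char → Option (List Char × List Char)
  | [] => none
  | c :: rest =>
    if c = '1' ∧ rest.take 2 = ['1', '0'] then some ([], rest.drop 2)
    else (find110 rest).map fun p => (c :: p.1, p.2)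

theorem find110_some_eq : ∀ (t u v : List Char), find110 t = some (u, v) →
    t = u ++ '1' :: '1' :: '0' :: v := by
  intro t
  induction t with
  | nil => intro u v h; simp [find110] at h
  | cons c rest ih =>
    intro u v h
    by_cases hc : c = '1' ∧ rest.take 2 = ['1', '0']
    · rw [find110, if_pos hc] at h
      obtain ⟨hc1, hc2⟩ := hc
      subst hc1
      simp only [Option.some.injEq, Prod.mk.injEq] at h
      obtain ⟨hu, hv⟩ := h
      subst_vars
      rcases rest with _ | ⟨a, _ | ⟨b, r⟩⟩ <;> simp_all
    · rw [find110, if_neg hc] at h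
      simp only [Option.map_eq_some_iff] at h
      obtain ⟨⟨p, q⟩, hpq, hmk⟩ := h
      simp only [Prod.mk.injEq] at hmk
      obtain ⟨hu, hv⟩ := hmk
      subst_vars
      simp [ih p q hpq]

-- while loop: remove leftmost '110', counting, until none remains
def reduceB (t : List Char) (count : Nat) : List Char × Nat :=
  match h : find110 t with
  | some (u, v) => reduceB (u ++ v) (count + 1)
  | none => (t, count)
termination_by t.length
decreasing_by
  have := find110_some_eq t u v h
  subst this
  simp
  omega

-- t.rfind('0'): exact hand port (right-to-left search as index arithmetic on a left fold of the list)
def rfind0 : List Char → Int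
  | [] => -1
  | c :: rest =>
    let r := rfind0 rest
    if r ≥ 0 then r + 1 else if c = '0' then 0 else -1

def solution_alt (strings : List String) : List String :=
  strings.map (fun s =>
    let r := reduceB s.toList 0
    let t := r.1
    let count := r.2
    let pos := rfind0 t
    String.ofList (t.take (pos + 1).toNat ++ (List.replicate count ['1', '1', '0']).flatten
               ++ t.drop (pos + 1).toNat))

-- ===== PRECONDITION & SPEC =====
def Spec_solution (strings : List String) (out : List String) : Prop := out = solution_alt strings
instance (strings : List String) (out : List String) : Decidable (Spec_solution strings out) := by unfold Spec_solution; infer_instance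

-- ===== CLAIM (what is proved, stated in full; the proofs are below) =====
def Claim_equal_solution : Prop := ∀ (strings : List String), Dom_solution strings → Spec_solution strings (solution strings)

-- ===== LEMMAS AND PROOFS =====

-- runA splits over append
theorem runA_append : ∀ (a b st : List Char) (c : Nat),
    runA (a ++ b) st c = runA b (runA a st c).1 (runA a st c).2 := by
  intro a
  induction a with
  | nil => intro b st c; simp [runA]
  | cons x rest ih =>
    intro b st c
    rcases st with _ | ⟨p, _ | ⟨q, st'⟩⟩ <;> simp only [List.cons_append, runA] <;>
      first
      | exact ih b _ c
      | (split <;> exact ih b _ _)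

-- the count is a pure accumulator
theorem runA_count_shift : ∀ (l st : List Char) (c : Nat),
    runA l st (c + 1) = ((runA l st c).1, (runA l st c).2 + 1) := by
  intro l
  induction l with
  | nil => intro st c; simp [runA]
  | cons x rest ih =>
    intro st c
    rcases st with _ | ⟨p, _ | ⟨q, st'⟩⟩ <;> simp only [runA] <;>
      first
      | exact ih _ c
      | (split <;> exact ih _ _)

-- processing '1','1','0' from any state pushes twice then pops twice, counting one removal
theorem runA_110 : ∀ (v st : List Char) (c : Nat),
    runA ('1' :: '1' :: '0' :: v) st c = runA v st (c + 1) := by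
  intro v st c
  rcases st with _ | ⟨p, _ | ⟨q, st'⟩⟩ <;> simp [runA]

-- if the remaining input prefixed by the processed part contains no '110', A never pops
theorem runA_noInfix : ∀ (l st : List Char) (c : Nat),
    (∀ u v : List Char, st.reverse ++ l ≠ u ++ '1' :: '1' :: '0' :: v) →
    runA l st c = (l.reverse ++ st, c) := by
  intro l
  induction l with
  | nil => intro st c _; simp [runA]
  | cons x rest ih =>
    intro st c h
    rcases st with _ | ⟨p, _ | ⟨q, st'⟩⟩
    · simp only [runA]
      rw [ih (x :: []) c]
      · simp
      · intro u v hv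
        exact h u v (by simpa using hv)
    · simp only [runA]
      rw [ih (x :: [p]) c]
      · simp
      · intro u v hv
        exact h u v (by simpa using hv)
    · simp only [runA]
      split
      · rename_i hcond
        obtain ⟨hx, hp, hq⟩ := hcond
        exact absurd (h st'.reverse rest (by subst hx hp hq; simp)) (by simp)
      · rw [ih (x :: p :: q :: st') c]
        · simp
        · intro u v hv
          exact h u v (by simpa using hv)

theorem find110_of_split : ∀ (u v : List Char), find110 (u ++ '1' :: '1' :: '0' :: v) ≠ none := by
  intro u
  induction u with
  | nil => intro v; simp [find110]
  | cons c rest ih =>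
    intro v
    simp only [List.cons_append, find110]
    split
    · simp
    · simp only [ne_eq, Option.map_eq_none_iff]
      exact ih v

theorem find110_none_no_split (t : List Char) (h : find110 t = none) :
    ∀ u v : List Char, t ≠ u ++ '1' :: '1' :: '0' :: v := by
  intro u v hv
  exact find110_of_split u v (hv ▸ h)

-- main invariant: B's remove-leftmost loop computes A's stack remainder (reversed stack) and count
theorem reduceB_eq_runA : ∀ (t : List Char) (c : Nat),
    reduceB t c = ((runA t [] 0).1.reverse, c + (runA t [] 0).2) := by
  intro t
  induction t using (measure List.length).wf.induction with
  | _ t ih =>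
    intro c
    rw [reduceB]
    split
    · rename_i u v h
      have ht := find110_some_eq t u v h
      have hlen : (u ++ v).length < t.length := by subst ht; simp; omega
      rw [ih (u ++ v) hlen (c + 1)]
      subst ht
      rw [runA_append u ('1' :: '1' :: '0' :: v) [] 0, runA_110,
          runA_count_shift, runA_append u v [] 0]
      simp
      omega
    · rename_i h
      rw [runA_noInfix t [] 0 (by simpa using find110_none_no_split t h)]
      simp

-- rfind0 over a snoc
theorem rfind0_snoc : ∀ (l : List Char) (c : Char),
    rfind0 (l ++ [c]) = if c = '0' then (l.length : Int) else rfind0 l := by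
  intro l
  induction l with
  | nil =>
    intro c
    by_cases hc : c = '0' <;> simp [rfind0, hc]
  | cons a rest ih =>
    intro c
    simp only [List.cons_append, rfind0, ih c]
    by_cases hc : c = '0'
    · simp [hc]
    · simp [hc]

-- posLoopA ignores entries at or above the fuel index
theorem posLoopA_snoc_le : ∀ (i : Nat) (l : List Char) (c : Char), i ≤ l.length →
    posLoopA (l ++ [c]) i = posLoopA l i := by
  intro i
  induction i with
  | zero => intro l c _; simp [posLoopA]
  | succ j ih =>
    intro l c hij
    have hj : j < l.length := hij
    have hg : (l ++ [c]).getD j ' ' = l.getD j ' ' := by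
      simp [List.getD, List.getElem?_append_left hj]
    simp only [posLoopA, hg, ih l c (Nat.le_of_lt hj)]

theorem posLoopA_snoc : ∀ (l : List Char) (c : Char),
    posLoopA (l ++ [c]) (l.length + 1) =
      if c = '0' then (l.length : Int) else posLoopA l l.length := by
  intro l c
  have hg : (l ++ [c]).getD l.length ' ' = c := by simp [List.getD]
  simp only [posLoopA, hg]
  by_cases hc : c = '0'
  · simp [hc]
  · simp [hc, posLoopA_snoc_le l.length l c (Nat.le_refl _)]

-- the two right-to-left searches for the last '0' agree
theorem rfind0_eq_posLoopA : ∀ (l : List Char), rfind0 l = posLoopA l l.length := by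
  intro l
  induction l using List.reverseRecOn with
  | nil => simp [rfind0, posLoopA]
  | append_singleton l c ih =>
    rw [rfind0_snoc, List.length_append]
    simp only [List.length_cons, List.length_nil]
    rw [posLoopA_snoc]
    by_cases hc : c = '0' <;> simp [hc, ih]

-- ===== VERDICT (by name: the statement is the Claim_ definition above) =====
theorem solution_spec : Claim_equal_solution := by
  intro strings _
  unfold Spec_solution solution solution_alt
  apply List.map_congr_left
  intro s _
  simp only [reduceB_eq_runA s.toList 0, Nat.zero_add]
  rw [rfind0_eq_posLoopA]
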